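-- pv_equiv track=rewrite | github.com/Andreww09/Python | lab3/main.py | count_spectators
-- ===== SOURCE A (Python) =====
-- def count_spectators(a):
--     rez = []
--     for i in range(0, len(a)):
--         for j in range(0, len(a[0])):
--             for k in range(0, i):
--                 if a[k][j] >= a[i][j]:
--                     rez.append((i, j))
--                     break
--     return rez
-- ===== SOURCE B (Python) =====
-- def count_spectators(a):
--     if not a:
--         return []
--     m = len(a[0])
--     mx = list(a[0])
--     rez = []
--     for i in range(1, len(a)):
--         row = a[i]
--         for j in range(m):
--             v = row[j]
--             if mx[j] >= v:
--                 rez.append((i, j))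
--             if v > mx[j]:
--                 mx[j] = v
--     return rez
-- ===== Notes on version B (the rewrite author's own statement) =====
-- stated objective: faster
-- what changed: Replaces the inner rescan of all previous rows (for each cell, loop k<i over the column) by a per-column running maximum of the rows seen so far, compared once per cell.
import Mathlib
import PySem

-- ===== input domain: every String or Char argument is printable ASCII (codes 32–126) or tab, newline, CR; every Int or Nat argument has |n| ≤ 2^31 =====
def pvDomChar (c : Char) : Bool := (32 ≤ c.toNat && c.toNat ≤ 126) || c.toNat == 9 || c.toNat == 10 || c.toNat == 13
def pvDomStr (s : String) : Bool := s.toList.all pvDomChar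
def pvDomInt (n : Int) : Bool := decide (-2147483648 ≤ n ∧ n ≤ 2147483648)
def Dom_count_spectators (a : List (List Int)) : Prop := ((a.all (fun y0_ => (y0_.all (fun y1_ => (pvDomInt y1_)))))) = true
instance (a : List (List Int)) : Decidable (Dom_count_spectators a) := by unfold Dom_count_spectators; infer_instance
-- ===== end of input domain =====

-- B replaces A's per-cell rescan of all previous rows in the column by a per-column
-- running maximum of the rows seen so far (objective: faster).

-- ===== PORT A =====
-- a[i][j] (indices always in range under Pre_; the default is never read there)
def pvCell (a : List (List Int)) (i j : Int) : Int :=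
  PySem.List.pyGetD (PySem.List.pyGetD a i ([] : List Int)) j 0

-- the inner 'for k in range(0, i): … break' loop of A
def pvAInner (a : List (List Int)) (i j : Int) : List Int → List (Int × Int) → List (Int × Int)
  | [], rez => rez
  | k :: ks, rez =>
      if pvCell a k j ≥ pvCell a i j then rez ++ [(i, j)] else pvAInner a i j ks rez

def count_spectators (a : List (List Int)) : List (Int × Int) :=
  (PySem.List.pyRange 0 a.length).foldl (fun rez i =>
    (PySem.List.pyRange 0 (PySem.List.pyGetD a 0 ([] : List Int)).length).foldl (fun rez j =>
      pvAInner a i j (PySem.List.pyRange 0 i) rez) rez) []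

-- ===== PORT B =====
-- body of B's outer loop: one row i, the inner 'for j in range(m)' loop over state (rez, mx)
def pvBInner (a : List (List Int)) (m : Int) (st : List (Int × Int) × List Int) (i : Int) :
    List (Int × Int) × List Int :=
  let row := PySem.List.pyGetD a i ([] : List Int)
  (PySem.List.pyRange 0 m).foldl (fun st j =>
    let v := PySem.List.pyGetD row j 0
    let mj := PySem.List.pyGetD st.2 j 0
    (if mj ≥ v then st.1 ++ [(i, j)] else st.1,
     if v > mj then st.2.set j.toNat v else st.2)) st

def count_spectators_alt (a : List (List Int)) : List (Int × Int) :=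
  match a with
  | [] => []
  | r0 :: _ =>
    ((PySem.List.pyRange 1 a.length).foldl (pvBInner a r0.length)
      (([] : List (Int × Int)), r0)).1

-- ===== PRECONDITION & SPEC =====
-- Pre_ excludes exactly the ragged inputs on which Python A raises IndexError
-- (some row shorter than the first row); B raises there too.
def Pre_count_spectators (a : List (List Int)) : Prop :=
  ∀ r ∈ a, (a.headD []).length ≤ r.length
instance (a : List (List Int)) : Decidable (Pre_count_spectators a) := by
  unfold Pre_count_spectators; infer_instance
def pvWitness_count_spectators : List (List Int) := [[1, 2], [0, 3]]
def Spec_count_spectators (a : List (List Int)) (out : List (Int × Int)) : Prop := out = count_spectators_alt a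
instance (a : List (List Int)) (out : List (Int × Int)) : Decidable (Spec_count_spectators a out) := by unfold Spec_count_spectators; infer_instance

-- ===== CLAIM (what is proved, stated in full; the proofs are below) =====
def Claim_equal_count_spectators : Prop := ∀ (a : List (List Int)), Dom_count_spectators a → Pre_count_spectators a → Spec_count_spectators a (count_spectators a)

-- ===== LEMMAS AND PROOFS =====

-- whether row i has a ≥ predecessor above it in column j (A's inner-loop condition)
def pvHit (a : List (List Int)) (i j : Int) : Bool :=
  (PySem.List.pyRange 0 i).any (fun k => decide (pvCell a k j ≥ pvCell a i j))

-- running column maximum of rows 0..n in column j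
def pvColMax (a : List (List Int)) (j : Int) : Nat → Int
  | 0 => pvCell a 0 j
  | n + 1 => max (pvColMax a j n) (pvCell a (n + 1) j)

-- mx after B's inner loop has processed columns 0..t-1
def pvMxUpd (mx row : List Int) (t : Nat) : List Int :=
  (List.range mx.length).map (fun j =>
    if j < t then max (PySem.List.pyGetD mx j 0) (PySem.List.pyGetD row j 0)
    else PySem.List.pyGetD mx j 0)

theorem pvAInner_eq (a : List (List Int)) (i j : Int) (ks : List Int) (rez : List (Int × Int)) :
    pvAInner a i j ks rez =
      if ks.any (fun k => decide (pvCell a k j ≥ pvCell a i j)) then rez ++ [(i, j)] else rez := by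
  induction ks with
  | nil => simp [pvAInner]
  | cons k ks ih => by_cases h : pvCell a k j ≥ pvCell a i j <;> simp [pvAInner, h, ih]

theorem pvA_char (a : List (List Int)) :
    count_spectators a =
      (PySem.List.pyRange 0 a.length).flatMap (fun i =>
        ((PySem.List.pyRange 0 (PySem.List.pyGetD a 0 ([] : List Int)).length).filter
          (pvHit a i)).map (fun j => (i, j))) := by
  unfold count_spectators
  simp only [pvAInner_eq, PySem.List.foldl_append_if]
  rw [PySem.List.foldl_append_eq_flatMap]
  unfold pvHit
  simp [ge_iff_le]

theorem pvColMax_ge_iff (a : List (List Int)) (j v : Int) (n : Nat) :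
    v ≤ pvColMax a j n ↔ ∃ k : Nat, k ≤ n ∧ v ≤ pvCell a k j := by
  induction n with
  | zero => simp [pvColMax]
  | succ n ih =>
    simp only [pvColMax, le_max_iff, ih]
    constructor
    · rintro (⟨k, hk, h⟩ | h)
      · exact ⟨k, by omega, h⟩
      · exact ⟨n + 1, le_rfl, by push_cast; exact h⟩
    · rintro ⟨k, hk, h⟩
      rcases Nat.lt_or_ge k (n + 1) with hlt | hge
      · exact Or.inl ⟨k, by omega, h⟩
      · right
        have hk1 : k = n + 1 := by omega
        subst hk1
        push_cast at h
        exact h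

theorem pvHit_iff (a : List (List Int)) (i : Nat) (j : Int) (hi : 1 ≤ i) :
    pvHit a (i : Int) j = decide (pvCell a (i : Int) j ≤ pvColMax a j (i - 1)) := by
  rw [Bool.eq_iff_iff]
  simp only [pvHit, List.any_eq_true, PySem.List.mem_pyRange_one, decide_eq_true_eq, ge_iff_le]
  rw [pvColMax_ge_iff]
  constructor
  · rintro ⟨k, ⟨hk0, hki⟩, hge⟩
    refine ⟨k.toNat, by omega, ?_⟩
    rwa [Int.toNat_of_nonneg hk0]
  · rintro ⟨k, hk, hle⟩
    exact ⟨(k : Int), ⟨by omega, by omega⟩, hle⟩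

theorem pvMxUpd_getD_ge (mx row : List Int) (t : Nat) (j : Int) (hj : (t : Int) ≤ j) :
    PySem.List.pyGetD (pvMxUpd mx row t) j 0 = PySem.List.pyGetD mx j 0 := by
  have hj0 : 0 ≤ j := le_trans (by positivity) hj
  obtain ⟨p, rfl⟩ : ∃ p : Nat, j = (p : Int) := ⟨j.toNat, (Int.toNat_of_nonneg hj0).symm⟩
  rw [PySem.List.pyGetD_natCast, PySem.List.pyGetD_natCast]
  unfold pvMxUpd
  rcases Nat.lt_or_ge p mx.length with hp | hp
  · rw [PySem.List.getD_map_range _ _ _ _ hp]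
    have hpt : ¬ p < t := by omega
    simp [hpt, PySem.List.pyGetD_natCast]
  · rw [List.getD_eq_default, List.getD_eq_default] <;> simpa using hp

theorem pvMxUpd_set (mx row : List Int) (t : Nat) (ht : t < mx.length) :
    (if PySem.List.pyGetD row (t : Int) 0 > PySem.List.pyGetD mx (t : Int) 0 then
        (pvMxUpd mx row t).set t (PySem.List.pyGetD row (t : Int) 0)
     else pvMxUpd mx row t) = pvMxUpd mx row (t + 1) := by
  split_ifs with hv
  · apply List.ext_getElem
    · simp [pvMxUpd]
    · intro p hp1 hp2
      have hpm : p < mx.length := by simpa [pvMxUpd] using hp2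
      rw [List.getElem_set]
      simp only [pvMxUpd, List.getElem_map, List.getElem_range]
      by_cases hpt : t = p
      · subst hpt
        rw [if_pos rfl, if_pos (by omega : t < t + 1)]
        exact (max_eq_right hv.le).symm
      · rw [if_neg hpt]
        by_cases h1 : p < t
        · rw [if_pos h1, if_pos (by omega : p < t + 1)]
        · rw [if_neg h1, if_neg (by omega : ¬ p < t + 1)]
  · apply List.ext_getElem
    · simp [pvMxUpd]
    · intro p hp1 hp2
      have hpm : p < mx.length := by simpa [pvMxUpd] using hp2
      simp only [pvMxUpd, List.getElem_map, List.getElem_range]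
      by_cases h1 : p < t
      · rw [if_pos h1, if_pos (by omega : p < t + 1)]
      · by_cases hpt : p = t
        · subst hpt
          rw [if_neg h1, if_pos (by omega : p < p + 1)]
          exact (max_eq_left (not_lt.mp hv)).symm
        · rw [if_neg h1, if_neg (by omega : ¬ p < t + 1)]

theorem pvMxUpd_zero (mx row : List Int) : pvMxUpd mx row 0 = mx := by
  apply List.ext_getElem
  · simp [pvMxUpd]
  · intro p hp1 hp2
    simp only [pvMxUpd, List.getElem_map, List.getElem_range, Nat.not_lt_zero, if_false]
    rw [PySem.List.pyGetD_natCast, List.getD_eq_getElem]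

theorem pvInner_eq (i : Int) (row mx : List Int) (rez : List (Int × Int)) (t : Nat)
    (ht : t ≤ mx.length) :
    (PySem.List.pyRange 0 (t : Int)).foldl (fun st j =>
      let v := PySem.List.pyGetD row j 0
      let mj := PySem.List.pyGetD st.2 j 0
      (if mj ≥ v then st.1 ++ [(i, j)] else st.1,
       if v > mj then st.2.set j.toNat v else st.2)) (rez, mx) =
    (rez ++ ((PySem.List.pyRange 0 (t : Int)).filter (fun j =>
        decide (PySem.List.pyGetD row j 0 ≤ PySem.List.pyGetD mx j 0))).map (fun j => (i, j)),
     pvMxUpd mx row t) := by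
  induction t with
  | zero =>
    rw [show ((0 : Nat) : Int) = 0 by norm_num, PySem.List.pyRange_one_eq_nil le_rfl]
    simp [pvMxUpd_zero]
  | succ t ih =>
    have ht' : t ≤ mx.length := by omega
    have htl : t < mx.length := by omega
    rw [show (((t + 1 : Nat)) : Int) = (t : Int) + 1 by push_cast; ring]
    rw [PySem.List.pyRange_one_succ_right (by positivity : (0 : Int) ≤ (t : Int))]
    rw [List.foldl_append, ih ht']
    simp only [List.foldl_cons, List.foldl_nil]
    rw [pvMxUpd_getD_ge mx row t (t : Int) le_rfl]
    rw [show ((t : Int)).toNat = t from Int.toNat_natCast t]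
    rw [pvMxUpd_set mx row t htl]
    rw [List.filter_append, List.map_append]
    by_cases hc : row[t]?.getD 0 ≤ mx[t]?.getD 0
    · simp [hc, ge_iff_le, PySem.List.pyGetD_natCast, List.getD]
    · simp [hc, ge_iff_le, PySem.List.pyGetD_natCast, List.getD]

theorem pvOuter (a : List (List Int)) (r0 : List Int) (rest : List (List Int))
    (ha : a = r0 :: rest) (c : Nat) (hc : c ≤ rest.length) :
    ∃ mx : List Int,
      (PySem.List.pyRange 1 (1 + (c : Int))).foldl (pvBInner a r0.length)
        (([] : List (Int × Int)), r0) =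
        ((PySem.List.pyRange 1 (1 + (c : Int))).flatMap (fun i =>
          ((PySem.List.pyRange 0 (r0.length : Int)).filter (pvHit a i)).map (fun j => (i, j))), mx)
      ∧ mx.length = r0.length
      ∧ ∀ j : Nat, j < r0.length → PySem.List.pyGetD mx (j : Int) 0 = pvColMax a (j : Int) c := by
  induction c with
  | zero =>
    refine ⟨r0, ?_, rfl, ?_⟩
    · rw [show (1 + ((0 : Nat) : Int)) = 1 by norm_num, PySem.List.pyRange_one_eq_nil le_rfl]
      simp
    · intro j hj
      simp [pvColMax, pvCell, ha, PySem.List.pyGetD]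
  | succ c ihc =>
    have hc' : c ≤ rest.length := by omega
    obtain ⟨mx, hfold, hlen, hmx⟩ := ihc hc'
    have hcast : (1 + ((c + 1 : Nat) : Int)) = (1 + (c : Int)) + 1 := by push_cast; ring
    rw [hcast, PySem.List.pyRange_one_succ_right (by omega : (1 : Int) ≤ 1 + (c : Int))]
    rw [List.foldl_append, hfold]
    simp only [List.foldl_cons, List.foldl_nil]
    unfold pvBInner
    rw [pvInner_eq (1 + (c : Int)) (PySem.List.pyGetD a (1 + (c : Int)) ([] : List Int)) mx _
        r0.length (le_of_eq hlen.symm)]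
    have hfc : ∀ j ∈ PySem.List.pyRange 0 (r0.length : Int),
        (decide (PySem.List.pyGetD (PySem.List.pyGetD a (1 + (c : Int)) ([] : List Int)) j 0 ≤
          PySem.List.pyGetD mx j 0)) = pvHit a (1 + (c : Int)) j := by
      intro j hjmem
      obtain ⟨hj0, hjlt⟩ := PySem.List.mem_pyRange_one.mp hjmem
      obtain ⟨p, rfl⟩ : ∃ p : Nat, j = (p : Int) := ⟨j.toNat, (Int.toNat_of_nonneg hj0).symm⟩
      have hp : p < r0.length := by omega
      have h1 : (1 + (c : Int)) = (((1 + c : Nat)) : Int) := by push_cast; ring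
      rw [hmx p hp, h1, pvHit_iff a (1 + c) (p : Int) (by omega)]
      have h2 : 1 + c - 1 = c := by omega
      rw [h2]
      rfl
    refine ⟨pvMxUpd mx (PySem.List.pyGetD a (1 + (c : Int)) ([] : List Int)) r0.length, ?_, ?_, ?_⟩
    · rw [List.flatMap_append]
      rw [List.filter_congr hfc]
      simp only [List.flatMap_cons, List.flatMap_nil, List.append_nil]
    · simp [pvMxUpd, hlen]
    · intro j hj
      have hjm : j < mx.length := by omega
      rw [PySem.List.pyGetD_natCast, pvMxUpd, PySem.List.getD_map_range _ _ _ _ hjm]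
      rw [if_pos (by omega : j < r0.length)]
      rw [hmx j hj]
      have hsucc : pvColMax a (j : Int) (c + 1) =
          max (pvColMax a (j : Int) c) (pvCell a ((c : Int) + 1) (j : Int)) := by
        rw [pvColMax]
      rw [hsucc]
      congr 1
      show PySem.List.pyGetD (PySem.List.pyGetD a (1 + (c : Int)) ([] : List Int)) (j : Int) 0 = _
      rw [show (1 + (c : Int)) = (c : Int) + 1 by ring]
      rfl

-- ===== VERDICT (by name: the statement is the Claim_ definition above) =====
theorem count_spectators_spec : Claim_equal_count_spectators := by
  intro a _hdom _hpre
  unfold Spec_count_spectators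
  cases a with
  | nil => rfl
  | cons r0 rest =>
    obtain ⟨mx, hfold, hlen, hmx⟩ := pvOuter (r0 :: rest) r0 rest rfl rest.length le_rfl
    have hn : (((r0 :: rest).length : Nat) : Int) = 1 + (rest.length : Int) := by
      simp
      ring
    have hrow0 : PySem.List.pyGetD (r0 :: rest) 0 ([] : List Int) = r0 := by
      simp [PySem.List.pyGetD]
    have hitzero : ∀ j : Int, pvHit (r0 :: rest) 0 j = false := by
      intro j
      simp [pvHit, PySem.List.pyRange_one_eq_nil le_rfl]
    rw [pvA_char]
    unfold count_spectators_alt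
    dsimp only
    rw [hrow0]
    rw [PySem.List.pyRange_one_cons (by omega : (0 : Int) < (((r0 :: rest).length : Nat) : Int))]
    rw [show (0 : Int) + 1 = 1 by ring]
    rw [List.flatMap_cons]
    rw [hn, hfold]
    simp [hitzero]
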